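-- pv_equiv track=rewrite | github.com/zzithu/VoIP-CallQual | staticErrorDetection.py | retryErrors
-- ===== SOURCE A (Python) =====
-- def retryErrors(packets):
--     # See duplicated packets, consider flagging as dupicates rather than errors
--     seen_packets = set()
--     errors = 0
--     for pkt in packets:
--         #TODO change this to a better identifier if possible
--         packet_id = pkt['timestamp'] #this is unique to the packets, so if there is a duplicate thats no good!
--         if(packet_id) in seen_packets:
--             errors += 1
--         else:
--             seen_packets.add(packet_id)
--     return errors
-- ===== SOURCE B (Python) =====
-- def retryErrors(packets):
--     # Tabulate timestamp frequencies in one pass, then aggregate the excess counts.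
--     counts = {}
--     for pkt in packets:
--         t = pkt['timestamp']
--         counts[t] = counts.get(t, 0) + 1
--     return sum(c - 1 for c in counts.values())
-- ===== Notes on version B (the rewrite author's own statement) =====
-- stated objective: alternative
-- what changed: Replaces the seen-set with running error counter by a tabulate-then-aggregate decomposition: one pass builds a timestamp frequency table, then the result is the sum of the excess counts (c - 1) over its values.
import Mathlib
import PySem

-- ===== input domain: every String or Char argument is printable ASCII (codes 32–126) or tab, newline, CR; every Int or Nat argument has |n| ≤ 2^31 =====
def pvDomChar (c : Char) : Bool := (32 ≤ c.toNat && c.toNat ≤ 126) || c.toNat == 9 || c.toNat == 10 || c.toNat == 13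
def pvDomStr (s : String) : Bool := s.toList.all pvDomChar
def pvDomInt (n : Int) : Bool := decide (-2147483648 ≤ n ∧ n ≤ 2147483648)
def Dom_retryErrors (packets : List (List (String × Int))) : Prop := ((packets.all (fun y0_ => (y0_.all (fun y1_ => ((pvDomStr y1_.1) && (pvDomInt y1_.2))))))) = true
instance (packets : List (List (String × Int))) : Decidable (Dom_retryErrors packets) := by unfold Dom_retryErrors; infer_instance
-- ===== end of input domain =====

-- B replaces A's seen-set + running error counter by a tabulate-then-aggregate
-- decomposition (frequency table, then sum of excess counts); same cost, alternative structure.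


-- ===== PORT A =====
-- loop: pkt['timestamp'] (none = KeyError aborts), membership in the seen set, add/increment
def retryErrorsGo : List (List (String × Int)) → PySem.Set Int → Int → Option Int
  | [], _, errors => some errors
  | pkt :: rest, seen, errors =>
    match (PySem.Dict.mk pkt).get? "timestamp" with
    | none => none
    | some packet_id =>
      if PySem.Set.contains seen packet_id then retryErrorsGo rest seen (errors + 1)
      else retryErrorsGo rest (PySem.Set.add seen packet_id) errors

def retryErrors (packets : List (List (String × Int))) : Int :=
  (retryErrorsGo packets PySem.Set.empty 0).getD 0

-- ===== PORT B =====
-- first pass: counts[t] = counts.get(t, 0) + 1 (none = KeyError aborts)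
def retryErrorsAltCounts : List (List (String × Int)) → PySem.Dict Int Int → Option (PySem.Dict Int Int)
  | [], counts => some counts
  | pkt :: rest, counts =>
    match (PySem.Dict.mk pkt).get? "timestamp" with
    | none => none
    | some t => retryErrorsAltCounts rest (counts.insert t (counts.getD t 0 + 1))

def retryErrors_alt (packets : List (List (String × Int))) : Int :=
  match retryErrorsAltCounts packets PySem.Dict.empty with
  | none => 0
  | some counts => ((PySem.Dict.values counts).map (fun c => c - 1)).sum

-- ===== PRECONDITION & SPEC =====
-- Pre_ excludes exactly the packets missing a 'timestamp' key, on which A (and B) raise KeyError.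
def Pre_retryErrors (packets : List (List (String × Int))) : Prop :=
  ∀ pkt ∈ packets, ((PySem.Dict.mk pkt).get? "timestamp").isSome = true
instance (packets : List (List (String × Int))) : Decidable (Pre_retryErrors packets) := by
  unfold Pre_retryErrors; infer_instance

def pvWitness_retryErrors : (List (List (String × Int))) :=
  [[("timestamp", 1)], [("timestamp", 2)], [("timestamp", 1)]]

def Spec_retryErrors (packets : List (List (String × Int))) (out : Int) : Prop := out = retryErrors_alt packets
instance (packets : List (List (String × Int))) (out : Int) : Decidable (Spec_retryErrors packets out) := by unfold Spec_retryErrors; infer_instance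

-- ===== CLAIM (what is proved, stated in full; the proofs are below) =====
def Claim_equal_retryErrors : Prop := ∀ (packets : List (List (String × Int))), Dom_retryErrors packets → Pre_retryErrors packets → Spec_retryErrors packets (retryErrors packets)

-- ===== LEMMAS AND PROOFS =====

-- the timestamp stream both loops traverse (proof-side helper only)
def pvTs (packets : List (List (String × Int))) : List Int :=
  packets.map (fun pkt => ((PySem.Dict.mk pkt).get? "timestamp").getD 0)

theorem retryErrorsGo_eq (packets : List (List (String × Int))) :
    ∀ (seen : PySem.Set Int) (errors : Int), Pre_retryErrors packets →
    retryErrorsGo packets seen errors =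
      some (errors + (pvTs packets).length - (PySem.Set.update seen (pvTs packets)).length + seen.length) := by
  induction packets with
  | nil => intro seen errors _; simp [retryErrorsGo, pvTs, PySem.Set.update]
  | cons pkt rest ih =>
    intro seen errors hpre
    obtain ⟨t, ht⟩ := Option.isSome_iff_exists.mp (hpre pkt (List.mem_cons_self))
    have hrest : Pre_retryErrors rest := fun p hp => hpre p (List.mem_cons_of_mem _ hp)
    by_cases hc : PySem.Set.contains seen t = true
    · have hmem : t ∈ seen := by simpa using hc
      have hadd : PySem.Set.add seen t = seen := by simp [PySem.Set.add, hmem]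
      simp only [retryErrorsGo, ht, hc, ih _ _ hrest, pvTs, List.map_cons,
        Option.getD_some, PySem.Set.update, List.foldl_cons, hadd]
      simp only [List.length_cons]
      push_cast; ring
    · have hc' : PySem.Set.contains seen t = false := by simpa using hc
      have hmem : t ∉ seen := by simpa using hc'
      have hadd : PySem.Set.add seen t = seen ++ [t] := by simp [PySem.Set.add, hmem]
      simp only [retryErrorsGo, ht, hc', Bool.false_eq_true, if_false, ih _ _ hrest, pvTs,
        List.map_cons, Option.getD_some, PySem.Set.update, List.foldl_cons, hadd]
      congr 1
      simp only [List.length_cons, List.length_append, List.length_nil]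
      push_cast; ring

theorem retryErrorsAltCounts_eq (packets : List (List (String × Int))) :
    ∀ (d : PySem.Dict Int Int), Pre_retryErrors packets →
    retryErrorsAltCounts packets d =
      some ((pvTs packets).foldl (fun d t => d.insert t (d.getD t 0 + 1)) d) := by
  induction packets with
  | nil => intro d _; simp [retryErrorsAltCounts, pvTs]
  | cons pkt rest ih =>
    intro d hpre
    obtain ⟨t, ht⟩ := Option.isSome_iff_exists.mp (hpre pkt (List.mem_cons_self))
    have hrest : Pre_retryErrors rest := fun p hp => hpre p (List.mem_cons_of_mem _ hp)
    simp [retryErrorsAltCounts, ht, ih _ hrest, pvTs]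

theorem sum_count_ofList (ts : List Int) :
    ((PySem.Set.ofList ts).map (fun k => ((ts.count k : Int)))).sum = (ts.length : Int) := by
  have hperm : (PySem.Set.ofList ts).Perm ts.dedup := by
    apply List.perm_of_nodup_nodup_toFinset_eq (PySem.Set.nodup_ofList ts) ts.nodup_dedup
    ext a; simp [PySem.Set.mem_ofList]
  have hnat : ((ts.dedup).map (fun k => ts.count k)).sum = ts.length :=
    List.sum_map_count_dedup_eq_length ts
  calc ((PySem.Set.ofList ts).map (fun k => ((ts.count k : Int)))).sum
      = ((ts.dedup).map (fun k => ((ts.count k : Int)))).sum := (hperm.map _).sum_eq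
    _ = (ts.length : Int) := by
        rw [← hnat]
        push_cast
        simp [List.map_map, Function.comp_def]

-- ===== VERDICT (by name: the statement is the Claim_ definition above) =====
theorem retryErrors_spec : Claim_equal_retryErrors := by
  intro packets _ hpre
  unfold Spec_retryErrors retryErrors retryErrors_alt
  rw [retryErrorsGo_eq packets PySem.Set.empty 0 hpre, retryErrorsAltCounts_eq packets PySem.Dict.empty hpre]
  rw [PySem.Dict.foldl_insert_getD_add_one_eq_counter]
  have hval : (PySem.Dict.counter (pvTs packets)).values
      = (PySem.Set.ofList (pvTs packets)).map (fun k => (((pvTs packets).count k : Int), k).1) := by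
    have := PySem.Dict.items_counter (xs := pvTs packets)
    simp [PySem.Dict.values, this]
  set ts := pvTs packets with hts
  have hupd : PySem.Set.update PySem.Set.empty ts = PySem.Set.ofList ts := rfl
  simp only [Option.getD_some, hupd, hval, List.map_map]
  have hfun : ((fun c : Int => c - 1) ∘ fun k => (((ts.count k : Int)), k).1)
      = fun k => (ts.count k : Int) + (-1) := by funext k; simp [Function.comp]; ring
  rw [hfun, PySem.List.sum_map_add_int, sum_count_ofList,
    PySem.List.sum_map_const_int (PySem.Set.ofList ts) (-1 : Int)]
  simp [PySem.Set.empty]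
  ring
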